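-- pv_equiv track=rewrite | github.com/BobyMarley/brightwaw.pl | standardize_media.py | parse_and_consolidate
-- ===== SOURCE A (Python) =====
-- def parse_and_consolidate(text):
--     # ... (Same logic as consolidate_media.py) ...
--     # Simplified re-implementation inline
--     items = []
--     i = 0
--     n = len(text)
--
--     while i < n:
--         while i < n and text[i].isspace(): i += 1
--         if i >= n: break
--
--         if text.startswith('/*', i):
--             end = text.find('*/', i)
--             if end == -1: end = n
--             else: end += 2
--             items.append({'type': 'comment', 'content': text[i:end]})
--             i = end
--             continue
--
--         brace = text.find('{', i)
--         if brace == -1: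
--             items.append({'type': 'unknown', 'content': text[i:]})
--             break
--
--         selector = text[i:brace].strip()
--
--         j = brace + 1
--         depth = 1
--         while j < n and depth > 0:
--             if text[j] == '{': depth += 1
--             elif text[j] == '}': depth -= 1
--             j += 1
--
--         body = text[brace+1 : j-1].strip()
--
--         if selector.startswith('@media'):
--             # Normalize selector spaces
--             selector = ' '.join(selector.split())
--             items.append({'type': 'media', 'query': selector, 'content': body})
--         elif selector.startswith('@keyframes') or selector.startswith('@font-face'):
--             items.append({'type': 'other_at', 'query': selector, 'content': body})
--         else:
--             items.append({'type': 'rule', 'selector': selector, 'body': body})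
--
--         i = j
--
--     # Concatenate
--     root_ops = []
--     media_map = {}
--     media_order = []
--
--     for item in items:
--         if item['type'] == 'media':
--             q = item['query']
--             if q not in media_map:
--                 media_map[q] = []
--                 media_order.append(q)
--             media_map[q].append(item['content'])
--         else:
--             root_ops.append(item)
--
--     final_parts = []
--     for item in root_ops:
--         if item['type'] == 'comment': final_parts.append(item['content'])
--         elif item['type'] == 'rule': final_parts.append(f"{item['selector']} {{\n  {item['body']}\n}}")
--         elif item['type'] == 'other_at': final_parts.append(f"{item['query']} {{\n  {item['content']}\n}}")
--         else: final_parts.append(item.get('content',''))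
--
--     for q in media_order:
--         merged_body = '\n'.join(media_map[q])
--         final_parts.append(f"\n{q} {{\n{merged_body}\n}}")
--
--     return '\n'.join(final_parts)
-- ===== SOURCE B (Python) =====
-- def parse_and_consolidate(text):
--     # One fused pass: render comments/rules/other-at blocks straight into `parts`
--     # and group @media bodies in an insertion-ordered dict; no intermediate item list.
--     n = len(text)
--     parts = []
--     media = {}  # normalized query -> list of bodies, first-seen order
--     i = 0
--     while True:
--         while i < n and text[i].isspace():
--             i += 1
--         if i >= n:
--             break
--         if text.startswith('/*', i):
--             end = text.find('*/', i)
--             end = n if end == -1 else end + 2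
--             parts.append(text[i:end])
--             i = end
--             continue
--         brace = text.find('{', i)
--         if brace == -1:
--             parts.append(text[i:])
--             break
--         head = text[i:brace].strip()
--         j = brace + 1
--         depth = 1
--         while j < n and depth:
--             depth += (text[j] == '{') - (text[j] == '}')
--             j += 1
--         body = text[brace + 1:j - 1].strip()
--         if head.startswith('@media'):
--             media.setdefault(' '.join(head.split()), []).append(body)
--         else:
--             # rules and other at-blocks render identically
--             parts.append(f"{head} {{\n  {body}\n}}")
--         i = j
--     for q, bodies in media.items():
--         merged = '\n'.join(bodies)
--         parts.append(f"\n{q} {{\n{merged}\n}}")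
--     return '\n'.join(parts)
-- ===== Notes on version B (the rewrite author's own statement) =====
-- stated objective: simpler
-- what changed: B fuses A's three phases (scan to an item list, classify into root_ops/media_map/media_order, render) into one pass that renders non-media blocks directly into the output list and groups @media bodies in a single insertion-ordered dict via setdefault, dropping the item records, the separate classification loop and the rule/other_at distinction (they render identically).
import Mathlib
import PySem

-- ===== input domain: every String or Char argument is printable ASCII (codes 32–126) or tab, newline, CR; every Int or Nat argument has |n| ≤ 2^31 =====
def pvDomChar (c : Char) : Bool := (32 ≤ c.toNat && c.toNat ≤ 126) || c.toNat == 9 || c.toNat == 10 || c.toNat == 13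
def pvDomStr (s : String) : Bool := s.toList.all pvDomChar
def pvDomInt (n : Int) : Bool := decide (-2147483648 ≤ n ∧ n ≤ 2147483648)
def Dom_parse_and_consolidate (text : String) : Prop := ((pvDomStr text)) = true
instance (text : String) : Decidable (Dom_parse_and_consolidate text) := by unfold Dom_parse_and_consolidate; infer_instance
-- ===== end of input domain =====

-- B fuses A's scan/classify/render phases into one pass with a grouping dict; same output, same cost (objective: simpler).

-- ===== PORT A =====
-- while i < n and text[i].isspace(): i += 1   (shared by both ports: B has the identical loop)
def pvSkipWs (cs : List Char) (i : Nat) : Nat :=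
  if h : i < cs.length ∧ PySem.Chars.isspace (cs.getD i ' ') then pvSkipWs cs (i + 1) else i
termination_by cs.length - i
decreasing_by exact Nat.sub_succ_lt_self _ _ h.1

theorem pvSkipWs_ge (cs : List Char) (i : Nat) : i ≤ pvSkipWs cs i := by
  unfold pvSkipWs
  split
  · exact le_trans (Nat.le_succ i) (pvSkipWs_ge cs (i + 1))
  · exact le_refl i
termination_by cs.length - i
decreasing_by next h => exact Nat.sub_succ_lt_self _ _ h.1

-- A's inner loop: while j < n and depth > 0: if '{': depth += 1 elif '}': depth -= 1; j += 1
def pvBraceScanA (cs : List Char) (j : Nat) (depth : Nat) : Nat :=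
  if h : j < cs.length ∧ 0 < depth then
    pvBraceScanA cs (j + 1)
      (if cs.getD j ' ' = '{' then depth + 1 else if cs.getD j ' ' = '}' then depth - 1 else depth)
  else j
termination_by cs.length - j
decreasing_by exact Nat.sub_succ_lt_self _ _ h.1

theorem pvBraceScanA_ge (cs : List Char) (j : Nat) (d : Nat) : j ≤ pvBraceScanA cs j d := by
  unfold pvBraceScanA
  split
  · exact le_trans (Nat.le_succ j) (pvBraceScanA_ge cs (j + 1) _)
  · exact le_refl j
termination_by cs.length - j
decreasing_by next h => exact Nat.sub_succ_lt_self _ _ h.1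

inductive PItem
  | comment (content : List Char)
  | unknown (content : List Char)
  | media (query content : List Char)
  | other_at (query content : List Char)
  | rule (selector body : List Char)
deriving DecidableEq, Repr

-- end = text.find('*/', i); end = n if -1 else end+2   (same two lines in A and B)
def pvCommentEnd (cs : List Char) (i' : Nat) : Nat :=
  if PySem.Chars.findFrom cs "*/".toList (i' : Int) = -1 then cs.length
  else (PySem.Chars.findFrom cs "*/".toList (i' : Int)).toNat + 2

-- text[i:brace].strip()   (A's `selector`, B's `head`)
def pvHeadStr (cs : List Char) (i' b : Nat) : List Char :=
  PySem.Chars.strip (PySem.List.slice cs (some (i' : Int)) (some (b : Int)))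

-- text[brace+1 : j-1].strip()
def pvBodyStr (cs : List Char) (b j : Nat) : List Char :=
  PySem.Chars.strip (PySem.List.slice cs (some ((b + 1 : Nat) : Int)) (some ((j - 1 : Nat) : Int)))

theorem pvCommentEnd_gt (cs : List Char) (i' : Nat) (h : i' < cs.length) :
    i' < pvCommentEnd cs i' := by
  unfold pvCommentEnd
  by_cases he : PySem.Chars.findFrom cs "*/".toList (i' : Int) = -1
  · rw [if_pos he]; exact h
  · have h1 := (PySem.Chars.findFrom_natCast_spec cs "*/".toList i' (Nat.le_of_lt h) he).1
    have h2 : i' ≤ (PySem.Chars.findFrom cs "*/".toList (i' : Int)).toNat := by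
      have := Int.toNat_le_toNat h1
      simpa using this
    rw [if_neg he]
    exact Nat.lt_of_le_of_lt h2 (Nat.lt_add_of_pos_right (by exact Nat.zero_lt_two))

-- termination measures for the two scans
theorem pvScanDec_comment (cs : List Char) (i : Nat) (h1 : ¬ cs.length ≤ pvSkipWs cs i) :
    cs.length - pvCommentEnd cs (pvSkipWs cs i) < cs.length - i := by
  have hge := pvSkipWs_ge cs i
  have hlt := Nat.lt_of_not_le h1
  have hend := pvCommentEnd_gt cs (pvSkipWs cs i) hlt
  exact Nat.sub_lt_sub_left (Nat.lt_of_le_of_lt hge hlt) (Nat.lt_of_le_of_lt hge hend)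

theorem pvScanDec_brace (cs : List Char) (i j : Nat) (h1 : ¬ cs.length ≤ pvSkipWs cs i)
    (hb : ¬ PySem.Chars.findFrom cs "{".toList ((pvSkipWs cs i : Nat) : Int) = -1)
    (hj : (PySem.Chars.findFrom cs "{".toList ((pvSkipWs cs i : Nat) : Int)).toNat + 1 ≤ j) :
    cs.length - j < cs.length - i := by
  have hge := pvSkipWs_ge cs i
  have hlt := Nat.lt_of_not_le h1
  have hb' := (PySem.Chars.findFrom_natCast_spec cs "{".toList (pvSkipWs cs i)
    (Nat.le_of_lt hlt) hb).1
  have hb'' : pvSkipWs cs i ≤ (PySem.Chars.findFrom cs "{".toList ((pvSkipWs cs i : Nat) : Int)).toNat := by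
    have := Int.toNat_le_toNat hb'
    simpa using this
  have hij : i < j :=
    Nat.lt_of_le_of_lt (le_trans hge hb'') (Nat.lt_of_lt_of_le (Nat.lt_succ_self _) hj)
  exact Nat.sub_lt_sub_left (Nat.lt_of_le_of_lt hge hlt) hij

-- the main while-loop of A, producing the `items` list
def pvScanA (cs : List Char) (i : Nat) : List PItem :=
  let i' := pvSkipWs cs i
  if h1 : cs.length ≤ i' then []
  else if PySem.Chars.startswith (List.drop i' cs) "/*".toList then
    let ed := pvCommentEnd cs i'
    PItem.comment (PySem.List.slice cs (some (i' : Int)) (some (ed : Int))) :: pvScanA cs ed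
  else
    let b := PySem.Chars.findFrom cs "{".toList (i' : Int)
    if hb : b = -1 then [PItem.unknown (PySem.List.slice cs (some (i' : Int)))]
    else
      let brace := b.toNat
      let selector := pvHeadStr cs i' brace
      let j := pvBraceScanA cs (brace + 1) 1
      let body := pvBodyStr cs brace j
      (if PySem.Chars.startswith selector "@media".toList then
        PItem.media (PySem.Chars.join [' '] (PySem.Chars.split₀ selector)) body
      else if PySem.Chars.startswith selector "@keyframes".toList
          || PySem.Chars.startswith selector "@font-face".toList then
        PItem.other_at selector body
      else PItem.rule selector body) :: pvScanA cs j
termination_by cs.length - i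
decreasing_by
  · exact pvScanDec_comment cs i h1
  · exact pvScanDec_brace cs i _ h1 hb
      (pvBraceScanA_ge cs ((PySem.Chars.findFrom cs "{".toList ((pvSkipWs cs i : Nat) : Int)).toNat + 1) 1)

-- the classification loop: root_ops / media_map / media_order
def pvClassifyStepA (st : List PItem × PySem.Dict (List Char) (List (List Char)) × List (List Char))
    (item : PItem) : List PItem × PySem.Dict (List Char) (List (List Char)) × List (List Char) :=
  match item with
  | PItem.media q c =>
      let mo := if st.2.1.contains q then (st.2.1, st.2.2) else (st.2.1.insert q [], st.2.2 ++ [q])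
      (st.1, mo.1.modify q [] (· ++ [c]), mo.2)
  | it => (st.1 ++ [it], st.2.1, st.2.2)

-- the first rendering loop's body (comment / rule / other_at / else: content)
def pvRenderRootA (item : PItem) : List Char :=
  match item with
  | PItem.comment c => c
  | PItem.rule s b => s ++ " {\n  ".toList ++ b ++ "\n}".toList
  | PItem.other_at q c => q ++ " {\n  ".toList ++ c ++ "\n}".toList
  | PItem.unknown c => c
  | PItem.media _ c => c  -- unreachable (media items are never in root_ops); A's final `else` branch

def parse_and_consolidate (text : String) : String :=
  let cs := text.toList
  let items := pvScanA cs 0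
  let st := items.foldl pvClassifyStepA ([], PySem.Dict.empty, [])
  let final1 := st.1.foldl (fun acc it => acc ++ [pvRenderRootA it]) []
  let final2 := st.2.2.foldl (fun acc q =>
    acc ++ ['\n' :: (q ++ " {\n".toList ++ PySem.Chars.join ['\n'] (st.2.1.getD q []) ++ "\n}".toList)]) final1
  String.ofList (PySem.Chars.join ['\n'] final2)

-- ===== PORT B =====
-- B's inner loop: while j < n and depth: depth += (text[j]=='{') - (text[j]=='}'); j += 1
def pvBraceScanB (cs : List Char) (j : Nat) (depth : Int) : Nat :=
  if h : j < cs.length ∧ depth ≠ 0 then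
    pvBraceScanB cs (j + 1)
      (depth + (if cs.getD j ' ' = '{' then 1 else 0) - (if cs.getD j ' ' = '}' then 1 else 0))
  else j
termination_by cs.length - j
decreasing_by exact Nat.sub_succ_lt_self _ _ h.1

theorem pvBraceScanB_ge (cs : List Char) (j : Nat) (d : Int) : j ≤ pvBraceScanB cs j d := by
  unfold pvBraceScanB
  split
  · exact le_trans (Nat.le_succ j) (pvBraceScanB_ge cs (j + 1) _)
  · exact le_refl j
termination_by cs.length - j
decreasing_by next h => exact Nat.sub_succ_lt_self _ _ h.1

-- B's single fused loop: parts and the media dict are the two accumulators.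
-- `media.setdefault(q, []).append(body)` is ported as `modify q [] (· ++ [body])`
-- (exact: d[q] becomes d.get(q, []) + [body], a fresh key appends at the end).
def pvScanB (cs : List Char) (i : Nat) (parts : List (List Char))
    (media : PySem.Dict (List Char) (List (List Char))) :
    List (List Char) × PySem.Dict (List Char) (List (List Char)) :=
  let i' := pvSkipWs cs i
  if h1 : cs.length ≤ i' then (parts, media)
  else if PySem.Chars.startswith (List.drop i' cs) "/*".toList then
    let ed := pvCommentEnd cs i'
    pvScanB cs ed (parts ++ [PySem.List.slice cs (some (i' : Int)) (some (ed : Int))]) media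
  else
    let b := PySem.Chars.findFrom cs "{".toList (i' : Int)
    if hb : b = -1 then (parts ++ [PySem.List.slice cs (some (i' : Int))], media)
    else
      let head := pvHeadStr cs i' b.toNat
      let j := pvBraceScanB cs (b.toNat + 1) 1
      let body := pvBodyStr cs b.toNat j
      if PySem.Chars.startswith head "@media".toList then
        -- media.setdefault(q, []).append(body): d[q] = d.get(q, []) + [body]
        pvScanB cs j parts (media.modify (PySem.Chars.join [' '] (PySem.Chars.split₀ head)) [] (· ++ [body]))
      else
        pvScanB cs j (parts ++ [head ++ " {\n  ".toList ++ body ++ "\n}".toList]) media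
termination_by cs.length - i
decreasing_by
  · exact pvScanDec_comment cs i h1
  all_goals
    exact pvScanDec_brace cs i _ h1 hb
      (pvBraceScanB_ge cs ((PySem.Chars.findFrom cs "{".toList ((pvSkipWs cs i : Nat) : Int)).toNat + 1) 1)

def parse_and_consolidate_alt (text : String) : String :=
  let r := pvScanB text.toList 0 [] PySem.Dict.empty
  let parts := r.2.items.foldl (fun acc p =>
    acc ++ ['\n' :: (p.1 ++ " {\n".toList ++ PySem.Chars.join ['\n'] p.2 ++ "\n}".toList)]) r.1
  String.ofList (PySem.Chars.join ['\n'] parts)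

-- ===== PRECONDITION & SPEC =====
def Spec_parse_and_consolidate (text : String) (out : String) : Prop := out = parse_and_consolidate_alt text
instance (text : String) (out : String) : Decidable (Spec_parse_and_consolidate text out) := by unfold Spec_parse_and_consolidate; infer_instance

-- ===== CLAIM (what is proved, stated in full; the proofs are below) =====
def Claim_equal_parse_and_consolidate : Prop := ∀ (text : String), Dom_parse_and_consolidate text → Spec_parse_and_consolidate text (parse_and_consolidate text)

-- ===== LEMMAS AND PROOFS =====

-- proof-side view of A's pipeline
def pvIsMedia : PItem → Bool
  | PItem.media _ _ => true
  | _ => false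

def pvRootsParts (items : List PItem) : List (List Char) :=
  (items.filter (fun it => !pvIsMedia it)).map pvRenderRootA

def pvMediaD (d : PySem.Dict (List Char) (List (List Char))) :
    List PItem → PySem.Dict (List Char) (List (List Char))
  | [] => d
  | PItem.media q c :: t => pvMediaD (d.modify q [] (· ++ [c])) t
  | PItem.comment _ :: t => pvMediaD d t
  | PItem.unknown _ :: t => pvMediaD d t
  | PItem.other_at _ _ :: t => pvMediaD d t
  | PItem.rule _ _ :: t => pvMediaD d t

-- B's Int-depth brace scan computes A's Nat-depth one
theorem pvBraceScan_eq (cs : List Char) (j : Nat) (d : Nat) :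
    pvBraceScanB cs j (d : Int) = pvBraceScanA cs j d := by
  rw [pvBraceScanB, pvBraceScanA]
  by_cases hj : j < cs.length
  · by_cases hd : 0 < d
    · have h1 : (d : Int) ≠ 0 := by omega
      rw [dif_pos ⟨hj, h1⟩, dif_pos ⟨hj, hd⟩]
      have hc : (d : Int) + (if cs.getD j ' ' = '{' then 1 else 0)
            - (if cs.getD j ' ' = '}' then 1 else 0)
          = ((if cs.getD j ' ' = '{' then d + 1
              else if cs.getD j ' ' = '}' then d - 1 else d : Nat) : Int) := by
        split_ifs <;> first | omega | (exfalso; simp_all)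
      rw [hc, pvBraceScan_eq]
    · have hd0 : d = 0 := by omega
      subst hd0
      rw [dif_neg (by simp), dif_neg (by simp)]
  · rw [dif_neg (by tauto), dif_neg (by tauto)]
termination_by cs.length - j
decreasing_by omega

theorem pvBraceScan_eq_one (cs : List Char) (j : Nat) :
    pvBraceScanB cs j 1 = pvBraceScanA cs j 1 := by
  exact_mod_cast pvBraceScan_eq cs j 1

-- modifying a freshly inserted-empty key is one modify
theorem pvModify_fresh (d : PySem.Dict (List Char) (List (List Char))) (q : List Char)
    (f : List (List Char) → List (List Char)) (h : d.contains q = false) :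
    (d.insert q []).modify q [] f = d.modify q [] f := by
  simp [PySem.Dict.modify, PySem.Dict.insert_insert_self, PySem.Dict.getD_insert_self,
    PySem.Dict.getD_of_not_contains d [] h]

-- zeta-reduced one-step unfolding of A's scan (definitional)
theorem pvScanA_unfold (cs : List Char) (i : Nat) :
    pvScanA cs i =
      (if cs.length ≤ pvSkipWs cs i then []
      else if PySem.Chars.startswith (List.drop (pvSkipWs cs i) cs) "/*".toList = true then
        PItem.comment (PySem.List.slice cs (some ((pvSkipWs cs i : Nat) : Int))
            (some ((pvCommentEnd cs (pvSkipWs cs i) : Nat) : Int))) ::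
          pvScanA cs (pvCommentEnd cs (pvSkipWs cs i))
      else if PySem.Chars.findFrom cs "{".toList ((pvSkipWs cs i : Nat) : Int) = -1 then
        [PItem.unknown (PySem.List.slice cs (some ((pvSkipWs cs i : Nat) : Int)))]
      else
        (if PySem.Chars.startswith
            (pvHeadStr cs (pvSkipWs cs i) (PySem.Chars.findFrom cs "{".toList ((pvSkipWs cs i : Nat) : Int)).toNat)
            "@media".toList = true then
          PItem.media
            (PySem.Chars.join [' '] (PySem.Chars.split₀
              (pvHeadStr cs (pvSkipWs cs i) (PySem.Chars.findFrom cs "{".toList ((pvSkipWs cs i : Nat) : Int)).toNat)))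
            (pvBodyStr cs (PySem.Chars.findFrom cs "{".toList ((pvSkipWs cs i : Nat) : Int)).toNat
              (pvBraceScanA cs ((PySem.Chars.findFrom cs "{".toList ((pvSkipWs cs i : Nat) : Int)).toNat + 1) 1))
        else if (PySem.Chars.startswith
              (pvHeadStr cs (pvSkipWs cs i) (PySem.Chars.findFrom cs "{".toList ((pvSkipWs cs i : Nat) : Int)).toNat)
              "@keyframes".toList
            || PySem.Chars.startswith
              (pvHeadStr cs (pvSkipWs cs i) (PySem.Chars.findFrom cs "{".toList ((pvSkipWs cs i : Nat) : Int)).toNat)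
              "@font-face".toList) = true then
          PItem.other_at
            (pvHeadStr cs (pvSkipWs cs i) (PySem.Chars.findFrom cs "{".toList ((pvSkipWs cs i : Nat) : Int)).toNat)
            (pvBodyStr cs (PySem.Chars.findFrom cs "{".toList ((pvSkipWs cs i : Nat) : Int)).toNat
              (pvBraceScanA cs ((PySem.Chars.findFrom cs "{".toList ((pvSkipWs cs i : Nat) : Int)).toNat + 1) 1))
        else
          PItem.rule
            (pvHeadStr cs (pvSkipWs cs i) (PySem.Chars.findFrom cs "{".toList ((pvSkipWs cs i : Nat) : Int)).toNat)
            (pvBodyStr cs (PySem.Chars.findFrom cs "{".toList ((pvSkipWs cs i : Nat) : Int)).toNat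
              (pvBraceScanA cs ((PySem.Chars.findFrom cs "{".toList ((pvSkipWs cs i : Nat) : Int)).toNat + 1) 1))) ::
          pvScanA cs (pvBraceScanA cs ((PySem.Chars.findFrom cs "{".toList ((pvSkipWs cs i : Nat) : Int)).toNat + 1) 1)) := by
  rw [pvScanA]; rfl

-- zeta-reduced one-step unfolding of B's fused loop (definitional)
theorem pvScanB_unfold (cs : List Char) (i : Nat) (parts : List (List Char))
    (media : PySem.Dict (List Char) (List (List Char))) :
    pvScanB cs i parts media =
      (if cs.length ≤ pvSkipWs cs i then (parts, media)
      else if PySem.Chars.startswith (List.drop (pvSkipWs cs i) cs) "/*".toList = true then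
        pvScanB cs (pvCommentEnd cs (pvSkipWs cs i))
          (parts ++ [PySem.List.slice cs (some ((pvSkipWs cs i : Nat) : Int))
            (some ((pvCommentEnd cs (pvSkipWs cs i) : Nat) : Int))]) media
      else if PySem.Chars.findFrom cs "{".toList ((pvSkipWs cs i : Nat) : Int) = -1 then
        (parts ++ [PySem.List.slice cs (some ((pvSkipWs cs i : Nat) : Int))], media)
      else if PySem.Chars.startswith
          (pvHeadStr cs (pvSkipWs cs i) (PySem.Chars.findFrom cs "{".toList ((pvSkipWs cs i : Nat) : Int)).toNat)
          "@media".toList = true then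
        pvScanB cs (pvBraceScanB cs ((PySem.Chars.findFrom cs "{".toList ((pvSkipWs cs i : Nat) : Int)).toNat + 1) 1) parts
          (media.modify
            (PySem.Chars.join [' '] (PySem.Chars.split₀
              (pvHeadStr cs (pvSkipWs cs i) (PySem.Chars.findFrom cs "{".toList ((pvSkipWs cs i : Nat) : Int)).toNat)))
            [] (· ++ [pvBodyStr cs (PySem.Chars.findFrom cs "{".toList ((pvSkipWs cs i : Nat) : Int)).toNat
              (pvBraceScanB cs ((PySem.Chars.findFrom cs "{".toList ((pvSkipWs cs i : Nat) : Int)).toNat + 1) 1)]))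
      else
        pvScanB cs (pvBraceScanB cs ((PySem.Chars.findFrom cs "{".toList ((pvSkipWs cs i : Nat) : Int)).toNat + 1) 1)
          (parts ++ [pvHeadStr cs (pvSkipWs cs i) (PySem.Chars.findFrom cs "{".toList ((pvSkipWs cs i : Nat) : Int)).toNat
            ++ " {\n  ".toList
            ++ pvBodyStr cs (PySem.Chars.findFrom cs "{".toList ((pvSkipWs cs i : Nat) : Int)).toNat
              (pvBraceScanB cs ((PySem.Chars.findFrom cs "{".toList ((pvSkipWs cs i : Nat) : Int)).toNat + 1) 1)
            ++ "\n}".toList])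
          media) := by
  rw [pvScanB]; rfl

-- B's fused loop = A's scan, then render roots / group media
theorem pvScanB_fused (cs : List Char) (i : Nat) (parts : List (List Char))
    (media : PySem.Dict (List Char) (List (List Char))) :
    pvScanB cs i parts media =
      (parts ++ pvRootsParts (pvScanA cs i), pvMediaD media (pvScanA cs i)) := by
  rw [pvScanB_unfold, pvScanA_unfold]
  by_cases h1 : cs.length ≤ pvSkipWs cs i
  · rw [if_pos h1, if_pos h1]
    simp [pvRootsParts, pvMediaD]
  · rw [if_neg h1, if_neg h1]
    by_cases h2 : PySem.Chars.startswith (List.drop (pvSkipWs cs i) cs) "/*".toList = true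
    · rw [if_pos h2, if_pos h2, pvScanB_fused]
      simp [pvRootsParts, pvMediaD, pvIsMedia, pvRenderRootA]
    · rw [if_neg h2, if_neg h2]
      by_cases hb : PySem.Chars.findFrom cs "{".toList ((pvSkipWs cs i : Nat) : Int) = -1
      · rw [if_pos hb, if_pos hb]
        simp [pvRootsParts, pvMediaD, pvIsMedia, pvRenderRootA]
      · rw [if_neg hb, if_neg hb, pvBraceScan_eq_one]
        by_cases hm : PySem.Chars.startswith
            (pvHeadStr cs (pvSkipWs cs i) (PySem.Chars.findFrom cs "{".toList ((pvSkipWs cs i : Nat) : Int)).toNat)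
            "@media".toList = true
        · rw [if_pos hm, if_pos hm, pvScanB_fused]
          simp [pvRootsParts, pvMediaD, pvIsMedia]
        · rw [if_neg hm, if_neg hm, pvScanB_fused]
          split_ifs <;> simp [pvRootsParts, pvMediaD, pvIsMedia, pvRenderRootA]
termination_by cs.length - i
decreasing_by
  · have hge := pvSkipWs_ge cs i
    have := pvCommentEnd_gt cs (pvSkipWs cs i) (by omega)
    omega
  all_goals
    have hge := pvSkipWs_ge cs i
    have hb' := (PySem.Chars.findFrom_natCast_spec cs "{".toList (pvSkipWs cs i)
      (by omega) (by assumption)).1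
    have hjA := pvBraceScanA_ge cs ((PySem.Chars.findFrom cs "{".toList ((pvSkipWs cs i : Nat) : Int)).toNat + 1) 1
    have hjB := pvBraceScanB_ge cs ((PySem.Chars.findFrom cs "{".toList ((pvSkipWs cs i : Nat) : Int)).toNat + 1) 1
    omega

-- A's classification loop, with the invariant `media_order = media_map.keys`
theorem pvClassify_spec (items : List PItem) :
    ∀ (r : List PItem) (m : PySem.Dict (List Char) (List (List Char))) (o : List (List Char)),
      o = m.keys → m.keys.Nodup →
      items.foldl pvClassifyStepA (r, m, o) =
        (r ++ items.filter (fun it => !pvIsMedia it), pvMediaD m items, (pvMediaD m items).keys)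
        ∧ (pvMediaD m items).keys.Nodup := by
  induction items with
  | nil =>
    intro r m o ho hn
    simp [pvMediaD, ho, hn]
  | cons it t ih =>
    intro r m o ho hn
    cases it with
    | media q c =>
      by_cases hc : m.contains q = true
      · have hk : (m.modify q [] (· ++ [c])).keys = m.keys := by
          rw [PySem.Dict.keys_modify]
          exact PySem.Dict.keys_insert_of_contains m _ hc
        have := ih r (m.modify q [] (· ++ [c])) o (ho.trans hk.symm) (by rw [hk]; exact hn)
        simpa [pvClassifyStepA, hc, pvMediaD, pvIsMedia] using this
      · have hc' : m.contains q = false := by simpa using hc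
        have hq : q ∉ m.keys := by
          intro hmem
          rw [← PySem.Dict.contains_iff_mem_keys] at hmem
          simp [hc'] at hmem
        have hins : (m.insert q []).modify q [] (· ++ [c]) = m.modify q [] (· ++ [c]) :=
          pvModify_fresh m q _ hc'
        have hk : (m.modify q [] (· ++ [c])).keys = m.keys ++ [q] := by
          rw [PySem.Dict.keys_modify]
          exact PySem.Dict.keys_insert_of_not_contains m _ hc'
        have := ih r (m.modify q [] (· ++ [c])) (o ++ [q])
          (by rw [hk, ho]) (by rw [hk]; simp [List.nodup_append, hn]; exact fun a ha hqa => hq (hqa ▸ ha))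
        simpa [pvClassifyStepA, hc', hins, pvMediaD, pvIsMedia] using this
    | comment c =>
      have := ih (r ++ [PItem.comment c]) m o ho hn
      simpa [pvClassifyStepA, pvMediaD, pvIsMedia] using this
    | unknown c =>
      have := ih (r ++ [PItem.unknown c]) m o ho hn
      simpa [pvClassifyStepA, pvMediaD, pvIsMedia] using this
    | other_at q c =>
      have := ih (r ++ [PItem.other_at q c]) m o ho hn
      simpa [pvClassifyStepA, pvMediaD, pvIsMedia] using this
    | rule s b =>
      have := ih (r ++ [PItem.rule s b]) m o ho hn
      simpa [pvClassifyStepA, pvMediaD, pvIsMedia] using this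

-- ===== VERDICT (by name: the statement is the Claim_ definition above) =====
theorem parse_and_consolidate_spec : Claim_equal_parse_and_consolidate := by
  intro text _
  unfold Spec_parse_and_consolidate parse_and_consolidate parse_and_consolidate_alt
  have hcl := pvClassify_spec (pvScanA text.toList 0) [] PySem.Dict.empty [] rfl (by simp)
  simp only [pvScanB_fused, hcl.1, List.nil_append]
  rw [PySem.List.foldl_append_singleton_eq_map, PySem.List.foldl_append_singleton_eq_map,
    PySem.List.foldl_append_singleton_eq_map]
  rw [PySem.Dict.items_eq_map_keys _ hcl.2 []]
  simp [pvRootsParts, List.map_map, Function.comp_def]
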